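-- pv_equiv track=rewrite | github.com/kvufee/shad-yandex-python | 01.2.BasicTypes/tasks/filter_list_by_list/filter_list_by_list.py | filter_list_by_list
-- ===== SOURCE A (Python) =====
-- def filter_list_by_list(lst_a: list[int] | range, lst_b: list[int] | range) -> list[int]:
--     """
--     Filter first sorted list by other sorted list
--     :param lst_a: first sorted list
--     :param lst_b: second sorted list
--     :return: filtered sorted list
--     """
--     ans: list[int] = []
--     i = 0
--     j = 0
--
--     if isinstance(lst_a, range):
--         lst_a = list(lst_a)
--     if isinstance(lst_b, range):
--         lst_b = list(lst_b)
--
--     if len(lst_b) == 0: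
--         return lst_a
--     if len(lst_a) == 0:
--         return []
--     if len(lst_a) != len(lst_b):
--         return []
--
--     while i < len(lst_a) and j < len(lst_b):
--         if lst_a[i] < lst_b[j]:
--             ans.append(lst_a[i])
--             i += 1
--         elif lst_a[i] > lst_b[j]:
--             j += 1
--         else:
--             i += 1
--             j += 1
--
--     while i < len(lst_a):
--         ans.append(lst_a[i])
--         i += 1
--
--     return ans
-- ===== SOURCE B (Python) =====
-- def filter_list_by_list(lst_a, lst_b):
--     """
--     Filter first sorted list by other sorted list: instead of a two-pointer
--     merge, iterate over lst_b, consuming from the front of lst_a per element.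
--     """
--     if isinstance(lst_a, range):
--         lst_a = list(lst_a)
--     if isinstance(lst_b, range):
--         lst_b = list(lst_b)
--
--     if len(lst_b) == 0:
--         return lst_a
--     if len(lst_a) == 0:
--         return []
--     if len(lst_a) != len(lst_b):
--         return []
--
--     rest = lst_a
--     ans: list[int] = []
--     for y in lst_b:
--         i = 0
--         while i < len(rest) and rest[i] < y:
--             i += 1
--         ans += rest[:i]
--         if i < len(rest) and rest[i] == y:
--             i += 1
--         rest = rest[i:]
--     return ans + rest
-- ===== Notes on version B (the rewrite author's own statement) =====
-- stated objective: alternative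
-- what changed: Replaces A's simultaneous two-pointer index merge (plus a separate tail-copy loop) with a single for-loop over lst_b that consumes from the front of lst_a per element (emit the prefix below y, drop one match), flushing the leftover suffix at the end; the guards are kept and the result is identical on every input.
import Mathlib
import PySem

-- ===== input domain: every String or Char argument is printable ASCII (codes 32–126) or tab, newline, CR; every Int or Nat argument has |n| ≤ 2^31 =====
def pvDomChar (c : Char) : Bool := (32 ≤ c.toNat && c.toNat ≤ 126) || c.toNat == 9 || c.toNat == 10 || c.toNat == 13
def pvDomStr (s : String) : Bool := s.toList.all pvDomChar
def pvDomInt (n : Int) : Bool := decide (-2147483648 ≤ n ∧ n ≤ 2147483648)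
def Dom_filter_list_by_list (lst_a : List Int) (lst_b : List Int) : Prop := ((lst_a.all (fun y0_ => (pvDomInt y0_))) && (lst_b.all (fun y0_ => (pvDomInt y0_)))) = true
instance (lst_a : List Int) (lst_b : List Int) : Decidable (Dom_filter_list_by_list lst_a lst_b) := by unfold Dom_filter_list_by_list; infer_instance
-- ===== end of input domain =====

-- B replaces A's index-based two-pointer merge (plus tail copy loop) by a single pass over
-- lst_b that consumes a matching prefix of lst_a per element; equivalent on all inputs.


-- ===== PORT A =====
-- second `while i < len(lst_a): ans.append(lst_a[i]); i += 1`
def pvTailLoopA (lst_a : List Int) (i : Nat) (ans : List Int) : List Int :=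
  if h : i < lst_a.length then pvTailLoopA lst_a (i + 1) (ans ++ [lst_a[i]]) else ans
termination_by lst_a.length - i

-- first `while i < len(lst_a) and j < len(lst_b): …`, falling through to the second while
def pvMergeLoopA (lst_a lst_b : List Int) (i j : Nat) (ans : List Int) : List Int :=
  if h : i < lst_a.length ∧ j < lst_b.length then
    if lst_a[i]'h.1 < lst_b[j]'h.2 then
      pvMergeLoopA lst_a lst_b (i + 1) j (ans ++ [lst_a[i]'h.1])
    else if lst_a[i]'h.1 > lst_b[j]'h.2 then
      pvMergeLoopA lst_a lst_b i (j + 1) ans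
    else
      pvMergeLoopA lst_a lst_b (i + 1) (j + 1) ans
  else pvTailLoopA lst_a i ans
termination_by (lst_a.length - i) + (lst_b.length - j)

def filter_list_by_list (lst_a : List Int) (lst_b : List Int) : List Int :=
  if lst_b.length = 0 then lst_a
  else if lst_a.length = 0 then []
  else if lst_a.length ≠ lst_b.length then []
  else pvMergeLoopA lst_a lst_b 0 0 []

-- ===== PORT B =====
-- inner `i = 0; while i < len(rest) and rest[i] < y: i += 1`
def pvScanB (rest : List Int) (y : Int) (i : Nat) : Nat :=
  if h : i < rest.length then
    if rest[i] < y then pvScanB rest y (i + 1) else i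
  else i
termination_by rest.length - i

-- one iteration of `for y in lst_b:` — rest[:i] and rest[i:] with 0 ≤ i ≤ len(rest)
-- are exactly List.take i / List.drop i
def pvStepB (st : List Int × List Int) (y : Int) : List Int × List Int :=
  let i := pvScanB st.1 y 0
  let ans := st.2 ++ st.1.take i
  if h : i < st.1.length then
    if st.1[i]'h = y then (st.1.drop (i + 1), ans) else (st.1.drop i, ans)
  else (st.1.drop i, ans)

def filter_list_by_list_alt (lst_a : List Int) (lst_b : List Int) : List Int :=
  if lst_b.length = 0 then lst_a
  else if lst_a.length = 0 then []
  else if lst_a.length ≠ lst_b.length then []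
  else
    let st := lst_b.foldl pvStepB (lst_a, ([] : List Int))
    st.2 ++ st.1

-- ===== PRECONDITION & SPEC =====
def Spec_filter_list_by_list (lst_a : List Int) (lst_b : List Int) (out : List Int) : Prop :=
  out = filter_list_by_list_alt lst_a lst_b
instance (lst_a : List Int) (lst_b : List Int) (out : List Int) : Decidable (Spec_filter_list_by_list lst_a lst_b out) := by
  unfold Spec_filter_list_by_list; infer_instance

-- ===== CLAIM (what is proved, stated in full; the proofs are below) =====
def Claim_equal_filter_list_by_list : Prop :=
  ∀ (lst_a : List Int) (lst_b : List Int), Dom_filter_list_by_list lst_a lst_b →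
    Spec_filter_list_by_list lst_a lst_b (filter_list_by_list lst_a lst_b)

-- ===== LEMMAS AND PROOFS =====

-- abstract form of the merge recursion, on the remaining suffixes
def pvMergeL (a b : List Int) : List Int :=
  match a, b with
  | [], _ => []
  | x :: a', [] => x :: a'
  | x :: a', y :: b' =>
    if x < y then x :: pvMergeL a' (y :: b')
    else if y < x then pvMergeL (x :: a') b'
    else pvMergeL a' b'
termination_by a.length + b.length

theorem pvTailLoopA_eq (lst_a : List Int) (i : Nat) (ans : List Int) :
    pvTailLoopA lst_a i ans = ans ++ lst_a.drop i := by
  induction i, ans using pvTailLoopA.induct lst_a with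
  | case1 i ans h ih =>
    rw [pvTailLoopA, dif_pos h, ih, List.drop_eq_getElem_cons h]
    simp
  | case2 i ans h =>
    rw [pvTailLoopA, dif_neg h, List.drop_eq_nil_of_le (by omega)]
    simp

theorem pvMergeLoopA_eq (lst_a lst_b : List Int) (i j : Nat) (ans : List Int) :
    pvMergeLoopA lst_a lst_b i j ans = ans ++ pvMergeL (lst_a.drop i) (lst_b.drop j) := by
  induction i, j, ans using pvMergeLoopA.induct lst_a lst_b with
  | case1 i j ans h hlt ih =>
    rw [pvMergeLoopA, dif_pos h, if_pos hlt, ih,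
      List.drop_eq_getElem_cons h.1, List.drop_eq_getElem_cons h.2, pvMergeL,
      if_pos hlt]
    simp
  | case2 i j ans h hlt hgt ih =>
    rw [pvMergeLoopA, dif_pos h, if_neg hlt, if_pos hgt, ih,
      List.drop_eq_getElem_cons h.1, List.drop_eq_getElem_cons h.2, pvMergeL,
      if_neg hlt, if_pos hgt, ← List.drop_eq_getElem_cons h.1]
  | case3 i j ans h hlt hgt ih =>
    rw [pvMergeLoopA, dif_pos h, if_neg hlt, if_neg hgt, ih,
      List.drop_eq_getElem_cons h.1, List.drop_eq_getElem_cons h.2, pvMergeL,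
      if_neg hlt, if_neg hgt]
  | case4 i j ans h =>
    rw [pvMergeLoopA, dif_neg h, pvTailLoopA_eq]
    rcases Nat.lt_or_ge i lst_a.length with hi | hi
    · have hj : lst_b.length ≤ j := by
        rcases Nat.lt_or_ge j lst_b.length with hj | hj
        · exact absurd ⟨hi, hj⟩ h
        · exact hj
      rw [List.drop_eq_nil_of_le hj, List.drop_eq_getElem_cons hi, pvMergeL,
        ← List.drop_eq_getElem_cons hi]
    · rw [List.drop_eq_nil_of_le hi, pvMergeL]

theorem pvMergeL_nil (a : List Int) : pvMergeL a [] = a := by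
  cases a <;> rw [pvMergeL]

theorem pvScanB_eq (rest : List Int) (y : Int) (i : Nat) :
    pvScanB rest y i = i + ((rest.drop i).takeWhile (fun x => decide (x < y))).length := by
  induction i using pvScanB.induct rest y with
  | case1 i h hlt ih =>
    rw [pvScanB, dif_pos h, if_pos hlt, ih, List.drop_eq_getElem_cons h,
      List.takeWhile_cons, if_pos (by simpa using hlt)]
    simp
    omega
  | case2 i h hge =>
    rw [pvScanB, dif_pos h, if_neg hge, List.drop_eq_getElem_cons h,
      List.takeWhile_cons, if_neg (by simpa using hge)]
    simp
  | case3 i h =>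
    rw [pvScanB, dif_neg h, List.drop_eq_nil_of_le (by omega)]
    simp

theorem pvTake_lenTakeWhile (p : Int → Bool) (l : List Int) :
    l.take (l.takeWhile p).length = l.takeWhile p := by
  induction l with
  | nil => rfl
  | cons x r ih =>
    rw [List.takeWhile_cons]
    split_ifs with hp
    · simpa [List.take_succ_cons] using ih
    · rfl

theorem pvDrop_lenTakeWhile (p : Int → Bool) (l : List Int) :
    l.drop (l.takeWhile p).length = l.dropWhile p := by
  induction l with
  | nil => rfl
  | cons x r ih =>
    rw [List.takeWhile_cons, List.dropWhile_cons]
    split_ifs with hp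
    · simpa using ih
    · rfl

-- what one element of lst_b does to the remaining suffix of lst_a
def pvRest (rest : List Int) (y : Int) : List Int :=
  match rest.dropWhile (fun x => decide (x < y)) with
  | [] => []
  | z :: t => if z = y then t else z :: t

theorem pvMergeL_cons (y : Int) (b' rest : List Int) :
    pvMergeL rest (y :: b') =
      rest.takeWhile (fun x => decide (x < y)) ++ pvMergeL (pvRest rest y) b' := by
  induction rest with
  | nil => simp [pvMergeL, pvRest]
  | cons x r ih =>
    by_cases hlt : x < y
    · rw [pvMergeL, if_pos hlt, ih]
      simp [pvRest, hlt]
    · by_cases hgt : y < x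
      · have hne : x ≠ y := by omega
        rw [pvMergeL, if_neg hlt, if_pos hgt]
        simp [pvRest, hlt, hne]
      · have hxy : x = y := by omega
        rw [pvMergeL, if_neg hlt, if_neg hgt]
        simp [pvRest, hxy]

theorem pvFoldB_eq (b rest ans : List Int) :
    (b.foldl pvStepB (rest, ans)).2 ++ (b.foldl pvStepB (rest, ans)).1
      = ans ++ pvMergeL rest b := by
  induction b generalizing rest ans with
  | nil => rw [List.foldl_nil, pvMergeL_nil]
  | cons y b' ih =>
    have hi : pvScanB rest y 0 = (rest.takeWhile (fun x => decide (x < y))).length := by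
      rw [pvScanB_eq]; simp
    have htake : rest.take (pvScanB rest y 0) = rest.takeWhile (fun x => decide (x < y)) := by
      rw [hi, pvTake_lenTakeWhile]
    have hdrop : rest.drop (pvScanB rest y 0) = rest.dropWhile (fun x => decide (x < y)) := by
      rw [hi, pvDrop_lenTakeWhile]
    have hstep : pvStepB (rest, ans) y
        = (pvRest rest y, ans ++ rest.takeWhile (fun x => decide (x < y))) := by
      unfold pvStepB
      simp only [htake]
      rcases Nat.lt_or_ge (pvScanB rest y 0) rest.length with hlen | hlen
      · have hcons : rest.drop (pvScanB rest y 0)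
            = rest[pvScanB rest y 0] :: rest.drop (pvScanB rest y 0 + 1) :=
          List.drop_eq_getElem_cons hlen
        have hrest : pvRest rest y
            = if rest[pvScanB rest y 0] = y then rest.drop (pvScanB rest y 0 + 1)
              else rest[pvScanB rest y 0] :: rest.drop (pvScanB rest y 0 + 1) := by
          unfold pvRest
          rw [← hdrop, hcons]
        rw [dif_pos hlen, hrest]
        split_ifs with heq
        · rfl
        · rw [← hcons]
      · have hnil : rest.drop (pvScanB rest y 0) = [] := List.drop_eq_nil_of_le hlen
        have hrest : pvRest rest y = [] := by
          unfold pvRest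
          rw [← hdrop, hnil]
        rw [dif_neg (by omega), hrest, hnil]
    rw [List.foldl_cons, hstep, ih, pvMergeL_cons]
    simp

-- ===== VERDICT (by name: the statement is the Claim_ definition above) =====
theorem filter_list_by_list_spec : Claim_equal_filter_list_by_list := by
  intro lst_a lst_b _
  unfold Spec_filter_list_by_list filter_list_by_list filter_list_by_list_alt
  split_ifs with h1 h2 h3
  · rfl
  · rfl
  · rfl
  · rw [pvMergeLoopA_eq, List.drop_zero, List.drop_zero]
    exact (pvFoldB_eq lst_b lst_a []).symm
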